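-- pv_equiv track=rewrite | github.com/nickteff/tableaux | algo/__init__.py | RSK
-- ===== SOURCE A (Python) =====
-- from bisect import bisect
--
-- def RSK(p):
--     '''Given a permutation p, spit out a pair of Young tableaux'''
--     P = []; Q = []
--     def insert(m, n=0):
--         '''Insert m into P, then place n in Q at the same place'''
--         for r in range(len(P)):
--             if m >= P[r][-1]:
--                 P[r].append(m); Q[r].append(n)
--                 return
--             c = bisect(P[r], m)
--             P[r][c],m = m,P[r][c]
--         P.append([m])
--         Q.append([n])
--
--     for i in range(len(p)):
--         insert(int(p[i]), i+1)
--     return (P,Q)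
-- ===== SOURCE B (Python) =====
-- def _scan(row, m):
--     """First index j with row[j] > m, or None."""
--     for j, v in enumerate(row):
--         if v > m:
--             return j
--     return None
--
--
-- def _insert(P, Q, m, n):
--     """Row insertion without mutation: rebuild the rows top-down."""
--     newP, newQ = [], []
--     for r in range(len(P)):
--         row, qrow = P[r], Q[r]
--         c = _scan(row, m)
--         if c is None:
--             newP.append(row + [m]); newQ.append(qrow + [n])
--             return newP + P[r + 1:], newQ + Q[r + 1:]
--         newP.append(row[:c] + [m] + row[c + 1:]); newQ.append(qrow)
--         m = row[c]
--     newP.append([m]); newQ.append([n])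
--     return newP, newQ
--
--
-- def RSK(p):
--     '''Given a permutation p, spit out a pair of Young tableaux'''
--     P, Q = [], []
--     for i, x in enumerate(p):
--         P, Q = _insert(P, Q, int(x), i + 1)
--     return (P, Q)
-- ===== Notes on version B (the rewrite author's own statement) =====
-- stated objective: alternative
-- what changed: Replaces the in-place mutating bump loop with bisect binary search by a purely functional structural recursion over the rows that finds the bump position with a linear first-element-greater scan and rebuilds (P,Q) immutably.
import Mathlib
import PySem

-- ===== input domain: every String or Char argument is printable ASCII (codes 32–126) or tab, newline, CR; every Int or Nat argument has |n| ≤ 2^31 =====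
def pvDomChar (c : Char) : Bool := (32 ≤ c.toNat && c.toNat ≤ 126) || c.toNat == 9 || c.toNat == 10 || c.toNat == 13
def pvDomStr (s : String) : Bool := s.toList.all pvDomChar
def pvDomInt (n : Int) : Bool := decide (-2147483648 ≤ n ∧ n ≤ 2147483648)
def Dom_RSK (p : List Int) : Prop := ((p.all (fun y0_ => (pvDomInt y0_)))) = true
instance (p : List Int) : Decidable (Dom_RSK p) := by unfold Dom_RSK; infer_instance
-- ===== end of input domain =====

-- B re-implements RSK row insertion purely functionally (structural recursion over the
-- rows, linear scan instead of bisect); return values proved equal, B performs no mutation.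

-- ===== PORT A =====
-- bisect.bisect (= bisect_right): the standard binary-search loop, exact transliteration
def bisectGo (a : List Int) (x : Int) (lo hi : Nat) : Nat :=
  if _h : lo < hi then
    let mid := (lo + hi) / 2
    if x < a.getD mid 0 then bisectGo a x lo mid
    else bisectGo a x (mid + 1) hi
  else lo
termination_by hi - lo

def pybisect (a : List Int) (x : Int) : Nat := bisectGo a x 0 a.length

-- the `for r in range(len(P))` loop of insert; list mutation ported as state passing.
-- P[r][-1] via pyGetD: every reachable row is nonempty (an empty row would raise in Python).
def goA (P Q : List (List Int)) (r : Nat) (m n : Int) : List (List Int) × List (List Int) :=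
  if _h : r < P.length then
    let row := P.getD r []
    if m ≥ PySem.List.pyGetD row (-1) 0 then
      (P.set r (row ++ [m]), Q.set r ((Q.getD r []) ++ [n]))
    else
      let c := pybisect row m
      goA (P.set r (row.set c m)) Q (r + 1) (row.getD c 0) n
  else (P ++ [[m]], Q ++ [[n]])
termination_by P.length - r
decreasing_by simp [List.length_set]; omega

def insertA (P Q : List (List Int)) (m n : Int) : List (List Int) × List (List Int) :=
  goA P Q 0 m n

-- `for i in range(len(p)): insert(int(p[i]), i+1)`
def loopA (p : List Int) (i : Nat) (PQ : List (List Int) × List (List Int)) :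
    List (List Int) × List (List Int) :=
  if _h : i < p.length then
    loopA p (i + 1) (insertA PQ.1 PQ.2 (PySem.List.pyGetD p (i : Int) 0) ((i : Int) + 1))
  else PQ
termination_by p.length - i

def RSK (p : List Int) : List (List Int) × List (List Int) := loopA p 0 ([], [])

-- ===== PORT B =====
-- _scan: first index whose value exceeds m
def scanB (row : List Int) (m : Int) : Option Nat :=
  match row with
  | [] => none
  | v :: t => if m < v then some 0 else (scanB t m).map (· + 1)

-- _insert: rebuild the rows top-down without mutation: the for-r loop with
-- accumulators newP/newQ, early return when the value lands at the end of a row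
def insLoopB : List (List Int) → List (List Int) → List (List Int) → List (List Int) →
    Int → Int → List (List Int) × List (List Int)
  | accP, accQ, [], _Q, m, n => (accP ++ [[m]], accQ ++ [[n]])
  | accP, accQ, row :: Pt, Q, m, n =>
    match scanB row m with
    | none => (accP ++ [row ++ [m]] ++ Pt, accQ ++ [Q.headD [] ++ [n]] ++ Q.tail)
    | some c =>
        insLoopB (accP ++ [row.take c ++ [m] ++ row.drop (c + 1)]) (accQ ++ [Q.headD []])
          Pt Q.tail (row.getD c 0) n

def insertBP (P Q : List (List Int)) (m n : Int) : List (List Int) × List (List Int) :=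
  insLoopB [] [] P Q m n

def RSK_alt (p : List Int) : List (List Int) × List (List Int) :=
  (PySem.List.enumerate p 0).foldl
    (fun PQ ix => insertBP PQ.1 PQ.2 ix.2 (ix.1 + 1)) ([], [])

-- ===== PRECONDITION & SPEC =====
def Spec_RSK (p : List Int) (out : List (List Int) × List (List Int)) : Prop := out = RSK_alt p
instance (p : List Int) (out : List (List Int) × List (List Int)) : Decidable (Spec_RSK p out) := by unfold Spec_RSK; infer_instance

-- ===== CLAIM (what is proved, stated in full; the proofs are below) =====
def Claim_equal_RSK : Prop := ∀ (p : List Int), Dom_RSK p → Spec_RSK p (RSK p)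

-- ===== LEMMAS AND PROOFS =====

-- invariant of reachable states: same number of rows, every row nonempty and sorted
def InvPQ (P Q : List (List Int)) : Prop :=
  P.length = Q.length ∧ ∀ row ∈ P, row ≠ [] ∧ row.Pairwise (· ≤ ·)

-- proof-side structural recursion over the rows; insLoopB is this plus an accumulator
def insertB : List (List Int) → List (List Int) → Int → Int →
    List (List Int) × List (List Int)
  | [], _Q, m, n => ([[m]], [[n]])
  | row :: Pt, Q, m, n =>
    match scanB row m with
    | none => ((row ++ [m]) :: Pt, (Q.headD [] ++ [n]) :: Q.tail)
    | some c =>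
      let res := insertB Pt Q.tail (row.getD c 0) n
      ((row.take c ++ [m] ++ row.drop (c + 1)) :: res.1, Q.headD [] :: res.2)

theorem insLoopB_eq : ∀ (P accP accQ Q : List (List Int)) (m n : Int),
    insLoopB accP accQ P Q m n
      = (accP ++ (insertB P Q m n).1, accQ ++ (insertB P Q m n).2) := by
  intro P
  induction P with
  | nil => intro accP accQ Q m n; simp [insLoopB, insertB]
  | cons row Pt ih =>
    intro accP accQ Q m n
    cases hscan : scanB row m with
    | none => simp [insLoopB, insertB, hscan]
    | some c =>
      simp only [insLoopB, insertB, hscan]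
      rw [ih]
      simp [List.append_assoc]

theorem insertBP_eq (P Q : List (List Int)) (m n : Int) :
    insertBP P Q m n = insertB P Q m n := by
  simp [insertBP, insLoopB_eq]

theorem sorted_getD_mono {a : List Int} (hs : a.Pairwise (· ≤ ·)) {i j : Nat}
    (hij : i ≤ j) (hj : j < a.length) : a.getD i 0 ≤ a.getD j 0 := by
  have hi : i < a.length := lt_of_le_of_lt hij hj
  rw [List.getD_eq_getElem a 0 hi, List.getD_eq_getElem a 0 hj]
  rcases eq_or_lt_of_le hij with h | h
  · subst h; exact le_refl _
  · exact List.pairwise_iff_getElem.mp hs i j hi hj h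

theorem scanB_none {row : List Int} {m : Int} (h : scanB row m = none) :
    ∀ v ∈ row, v ≤ m := by
  induction row with
  | nil => simp
  | cons v t ih =>
    intro w hw
    by_cases hv : m < v
    · simp [scanB, hv] at h
    · simp only [scanB, if_neg hv, Option.map_eq_none_iff] at h
      rcases List.mem_cons.mp hw with hw | hw
      · omega
      · exact ih h w hw

theorem scanB_none_of {row : List Int} {m : Int} (h : ∀ v ∈ row, v ≤ m) :
    scanB row m = none := by
  induction row with
  | nil => rfl
  | cons v t ih =>
    have hv : ¬ m < v := by have := h v (by simp); omega
    simp only [scanB, if_neg hv, Option.map_eq_none_iff]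
    exact ih (fun w hw => h w (by simp [hw]))

theorem scanB_some {row : List Int} {m : Int} {c : Nat} (h : scanB row m = some c) :
    c < row.length ∧ m < row.getD c 0 ∧ ∀ i < c, row.getD i 0 ≤ m := by
  induction row generalizing c with
  | nil => simp [scanB] at h
  | cons v t ih =>
    by_cases hv : m < v
    · simp only [scanB, if_pos hv, Option.some.injEq] at h
      subst h
      exact ⟨by simp, by simpa using hv, by omega⟩
    · simp only [scanB, if_neg hv, Option.map_eq_some_iff] at h
      obtain ⟨c', hc', rfl⟩ := h
      obtain ⟨h1, h2, h3⟩ := ih hc'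
      refine ⟨by simpa using h1, by simpa using h2, ?_⟩
      intro i hi
      cases i with
      | zero => simpa using le_of_not_gt hv
      | succ i => simpa using h3 i (by omega)

theorem scanB_isSome {row : List Int} {m : Int} (h : ∃ v ∈ row, m < v) :
    ∃ c, scanB row m = some c := by
  cases hc : scanB row m with
  | none =>
    obtain ⟨v, hv, hm⟩ := h
    exact absurd (scanB_none hc v hv) (by omega)
  | some c => exact ⟨c, rfl⟩

theorem bisectGo_eq (a : List Int) (x : Int) (j : Nat) (hs : a.Pairwise (· ≤ ·))
    (hj : ∀ i < j, a.getD i 0 ≤ x) (hj2 : j < a.length ∧ x < a.getD j 0) :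
    ∀ d lo hi, hi - lo ≤ d → lo ≤ j → j ≤ hi → hi ≤ a.length → bisectGo a x lo hi = j := by
  intro d
  induction d with
  | zero =>
    intro lo hi h1 h2 h3 h4
    unfold bisectGo
    rw [dif_neg (by omega)]
    omega
  | succ d ih =>
    intro lo hi h1 h2 h3 h4
    by_cases hlh : lo < hi
    · unfold bisectGo
      rw [dif_pos hlh]
      simp only
      by_cases hx : x < a.getD ((lo + hi) / 2) 0
      · rw [if_pos hx]
        have hjm : j ≤ (lo + hi) / 2 := by
          by_contra hc
          have := hj ((lo + hi) / 2) (by omega)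
          omega
        exact ih lo ((lo + hi) / 2) (by omega) h2 hjm (by omega)
      · rw [if_neg hx]
        have hjm : (lo + hi) / 2 + 1 ≤ j := by
          by_contra hc
          have hmono := sorted_getD_mono hs (i := j) (j := (lo + hi) / 2) (by omega) (by omega)
          omega
        exact ih ((lo + hi) / 2 + 1) hi (by omega) hjm h3 h4
    · unfold bisectGo
      rw [dif_neg hlh]
      omega

theorem pybisect_eq_scan {row : List Int} {m : Int} {c : Nat}
    (hs : row.Pairwise (· ≤ ·)) (h : scanB row m = some c) : pybisect row m = c := by
  obtain ⟨h1, h2, h3⟩ := scanB_some h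
  exact bisectGo_eq row m c hs h3 ⟨h1, h2⟩ row.length 0 row.length (by omega) (by omega)
    (by omega) (by omega)

theorem sorted_le_getLast {row : List Int} (hs : row.Pairwise (· ≤ ·)) (hne : row ≠ [])
    {v : Int} (hv : v ∈ row) : v ≤ row.getLast hne := by
  obtain ⟨i, hi, rfl⟩ := List.getElem_of_mem hv
  rw [List.getLast_eq_getElem hne]
  rw [← List.getD_eq_getElem row 0 hi, ← List.getD_eq_getElem row 0 (by omega)]
  exact sorted_getD_mono hs (by omega) (by omega)

theorem set_sorted {row : List Int} {c : Nat} {m : Int} (hs : row.Pairwise (· ≤ ·))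
    (hc : c < row.length) (hlow : ∀ i < c, row.getD i 0 ≤ m) (hhigh : m < row.getD c 0) :
    (row.set c m).Pairwise (· ≤ ·) := by
  rw [List.pairwise_iff_getElem] at hs ⊢
  intro i j hi hj hij
  rw [List.length_set] at hi hj
  rw [List.getElem_set, List.getElem_set]
  rw [List.getD_eq_getElem row 0 hc] at hhigh
  split_ifs with h1 h2 h2
  · omega
  · -- m ≤ row[j], c = i < j
    exact le_of_lt (lt_of_lt_of_le hhigh (hs c j hc hj (by omega)))
  · -- row[i] ≤ m, i < j = c
    have := hlow i (by omega)
    rwa [List.getD_eq_getElem row 0 hi] at this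
  · exact hs i j hi hj hij

theorem insertB_inv : ∀ (P Q : List (List Int)) (m n : Int), InvPQ P Q →
    InvPQ (insertB P Q m n).1 (insertB P Q m n).2 := by
  intro P
  induction P with
  | nil =>
    intro Q m n _
    constructor
    · rfl
    · intro row hrow
      simp only [insertB] at hrow
      simp at hrow
      subst hrow
      exact ⟨by simp, by simp⟩
  | cons row Pt ih =>
    intro Q m n hInv
    obtain ⟨hlen, hrows⟩ := hInv
    obtain ⟨hne, hsort⟩ := hrows row (by simp)
    have htlen : Pt.length = Q.tail.length := by
      rw [List.length_tail]
      simp at hlen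
      omega
    have htrows : ∀ r ∈ Pt, r ≠ [] ∧ r.Pairwise (· ≤ ·) :=
      fun r hr => hrows r (by simp [hr])
    cases hscan : scanB row m with
    | none =>
      have hall := scanB_none hscan
      constructor
      · simp only [insertB, hscan]
        simpa using htlen
      · intro r hr
        simp only [insertB, hscan] at hr
        rcases List.mem_cons.mp hr with hr | hr
        · subst hr
          refine ⟨by simp, ?_⟩
          rw [List.pairwise_append]
          exact ⟨hsort, by simp, by simpa using hall⟩
        · exact htrows r hr
    | some c =>
      obtain ⟨hc, hhigh, hlow⟩ := scanB_some hscan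
      have hres := ih Q.tail (row.getD c 0) n ⟨htlen.symm ▸ rfl, htrows⟩
      constructor
      · simp only [insertB, hscan]
        simp only [List.length_cons]
        have : (insertB Pt Q.tail (row.getD c 0) n).1.length
            = (insertB Pt Q.tail (row.getD c 0) n).2.length := hres.1
        omega
      · intro r hr
        simp only [insertB, hscan] at hr
        rcases List.mem_cons.mp hr with hr | hr
        · subst hr
          have hrw : row.take c ++ [m] ++ row.drop (c + 1) = row.set c m := by
            rw [List.set_eq_take_cons_drop m hc]; simp
          rw [hrw]
          refine ⟨by simp; omega, set_sorted hsort hc hlow hhigh⟩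
        · exact hres.2 r hr

theorem goA_eq : ∀ (d r : Nat) (P Q : List (List Int)) (m n : Int), P.length - r ≤ d →
    P.length = Q.length → (∀ row ∈ P.drop r, row ≠ [] ∧ row.Pairwise (· ≤ ·)) →
    goA P Q r m n = (P.take r ++ (insertB (P.drop r) (Q.drop r) m n).1,
                     Q.take r ++ (insertB (P.drop r) (Q.drop r) m n).2) := by
  intro d
  induction d with
  | zero =>
    intro r P Q m n h1 hlen _
    have hr : ¬ r < P.length := by omega
    unfold goA
    rw [dif_neg hr]
    rw [List.drop_of_length_le (by omega), List.drop_of_length_le (by omega),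
        List.take_of_length_le (by omega), List.take_of_length_le (by omega)]
    simp [insertB]
  | succ d ih =>
    intro r P Q m n h1 hlen hrows
    by_cases hr : r < P.length
    · have hrQ : r < Q.length := by omega
      have hPdrop : P.drop r = P[r] :: P.drop (r + 1) := List.drop_eq_getElem_cons hr
      have hQdrop : Q.drop r = Q[r] :: Q.drop (r + 1) := List.drop_eq_getElem_cons hrQ
      have hrowmem : P[r] ∈ P.drop r := by
        rw [hPdrop]
        exact List.mem_cons_self ..
      obtain ⟨hne, hsort⟩ := hrows _ hrowmem
      have hgetD : P.getD r [] = P[r] := List.getD_eq_getElem P [] hr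
      have hgetDQ : Q.getD r [] = Q[r] := List.getD_eq_getElem Q [] hrQ
      unfold goA
      rw [dif_pos hr]
      simp only [hgetD]
      rw [PySem.List.pyGetD_neg_one _ _ hne]
      by_cases hm : m ≥ (P[r]).getLast hne
      · rw [if_pos hm]
        have hnone : scanB P[r] m = none :=
          scanB_none_of (fun v hv => le_trans (sorted_le_getLast hsort hne hv) hm)
        rw [hPdrop, hQdrop]
        simp only [insertB, hnone, List.headD_cons, List.tail_cons]
        rw [List.set_eq_take_cons_drop _ hr, List.set_eq_take_cons_drop _ hrQ, hgetDQ]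
      · rw [if_neg hm]
        have hsome : ∃ c, scanB P[r] m = some c := by
          apply scanB_isSome
          exact ⟨(P[r]).getLast hne, List.getLast_mem hne, by omega⟩
        obtain ⟨c, hscan⟩ := hsome
        obtain ⟨hc, hhigh, hlow⟩ := scanB_some hscan
        rw [pybisect_eq_scan hsort hscan]
        have hdropset : (P.set r ((P[r]).set c m)).drop (r + 1) = P.drop (r + 1) := by
          rw [List.drop_set]
          simp
        rw [ih (r + 1) (P.set r ((P[r]).set c m)) Q ((P[r]).getD c 0) n
          (by simp only [List.length_set]; omega)
          (by simp only [List.length_set]; omega)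
          (by
            rw [hdropset]
            intro row hrow
            exact hrows row (by rw [hPdrop]; exact List.mem_cons_of_mem _ hrow))]
        rw [hdropset]
        have htakeset : (P.set r ((P[r]).set c m)).take (r + 1)
            = P.take r ++ [(P[r]).set c m] := by
          rw [List.set_eq_take_cons_drop _ hr]
          rw [show r + 1 = (P.take r).length + 1 by simp [List.length_take]; omega]
          rw [List.take_append]
          simp
        have htakeQ : Q.take (r + 1) = Q.take r ++ [Q[r]] := by
          rw [List.take_add_one]
          simp [List.getElem?_eq_getElem hrQ]
        have hrw : (P[r]).set c m = (P[r]).take c ++ [m] ++ (P[r]).drop (c + 1) := by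
          rw [List.set_eq_take_cons_drop m hc]; simp
        rw [htakeset, htakeQ, hPdrop, hQdrop]
        simp only [insertB, hscan, List.headD_cons, List.tail_cons]
        rw [hrw]
        simp only [List.append_assoc, List.singleton_append]
    · unfold goA
      rw [dif_neg hr]
      rw [List.drop_of_length_le (by omega), List.drop_of_length_le (by omega),
          List.take_of_length_le (by omega), List.take_of_length_le (by omega)]
      simp [insertB]

theorem insertA_eq (P Q : List (List Int)) (m n : Int) (h : InvPQ P Q) :
    insertA P Q m n = insertB P Q m n := by
  have := goA_eq P.length 0 P Q m n (by omega) h.1 (by simpa using h.2)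
  simpa [insertA] using this

theorem loopA_eq : ∀ (d : Nat) (p : List Int) (i : Nat) (PQ : List (List Int) × List (List Int)),
    p.length - i ≤ d → InvPQ PQ.1 PQ.2 →
    loopA p i PQ = (PySem.List.enumerate (p.drop i) (i : Int)).foldl
      (fun PQ ix => insertB PQ.1 PQ.2 ix.2 (ix.1 + 1)) PQ := by
  intro d
  induction d with
  | zero =>
    intro p i PQ h1 _
    unfold loopA
    rw [dif_neg (by omega)]
    rw [List.drop_of_length_le (by omega)]
    rfl
  | succ d ih =>
    intro p i PQ h1 hInv
    by_cases hi : i < p.length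
    · have hdrop : p.drop i = p[i] :: p.drop (i + 1) := List.drop_eq_getElem_cons hi
      unfold loopA
      rw [dif_pos hi]
      have hget : PySem.List.pyGetD p (i : Int) 0 = p[i] := by
        rw [PySem.List.pyGetD_natCast, List.getD_eq_getElem p 0 hi]
      rw [hget, insertA_eq _ _ _ _ hInv]
      have hnew := insertB_inv PQ.1 PQ.2 p[i] ((i : Int) + 1) hInv
      have := ih p (i + 1) (insertB PQ.1 PQ.2 p[i] ((i : Int) + 1)) (by omega) hnew
      rw [hdrop, PySem.List.enumerate_cons]
      simp only [List.foldl_cons]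
      rw [this]
      norm_num
    · unfold loopA
      rw [dif_neg hi]
      rw [List.drop_of_length_le (by omega)]
      rfl

-- ===== VERDICT (by name: the statement is the Claim_ definition above) =====
theorem RSK_spec : Claim_equal_RSK := by
  intro p _
  unfold Spec_RSK RSK RSK_alt
  have hfun : (fun (PQ : List (List Int) × List (List Int)) (ix : Int × Int) =>
      insertBP PQ.1 PQ.2 ix.2 (ix.1 + 1))
      = fun PQ ix => insertB PQ.1 PQ.2 ix.2 (ix.1 + 1) := by
    funext PQ ix
    exact insertBP_eq ..
  rw [hfun]
  have h := loopA_eq p.length p 0 ([], []) (by omega) ⟨rfl, by simp⟩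
  simpa using h
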